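-- pv_equiv track=rewrite | github.com/mjoaquim/mc621 | py/m-5/d2.py | ORsum
-- ===== SOURCE A (Python) =====
-- INT_SIZE = 20
--
-- def ORsum(arr, n):
--
--     zerocnt = [0 for i in range(INT_SIZE)]
--
--     for i in range(INT_SIZE):
--         for j in range(n):
--             if not (arr[j] & (1 << i)):
--                 zerocnt[i] += 1
--     ans = 0
--     for i in range(INT_SIZE):
--         ans += ((2 ** n - 1) - (2 ** zerocnt[i] - 1)) * 2 ** i
--
--     return ans
-- ===== SOURCE B (Python) =====
-- INT_SIZE = 20
--
-- def ORsum(arr, n):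
--     # cnt[i] = number of non-empty subsets of the processed prefix whose OR has bit i set;
--     # pow2 = number of subsets of the processed prefix (2**k).
--     cnt = [0] * INT_SIZE
--     pow2 = 1
--     for j in range(n):
--         x = arr[j]
--         cnt = [c + pow2 if x & (1 << i) else 2 * c for i, c in enumerate(cnt)]
--         pow2 *= 2
--     ans = 0
--     for i, c in enumerate(cnt):
--         ans += c << i
--     return ans
-- ===== Notes on version B (the rewrite author's own statement) =====
-- stated objective: alternative
-- what changed: Replaces A's per-bit zero-counting (20 passes over the prefix plus a closed-form sum) with a single left-to-right DP pass that maintains, for each of the 20 bits, the number of non-empty subsets of the processed prefix whose OR has that bit set, then sums cnt[i]<<i.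
-- outside the precondition, e.g. on ORsum([3, 5], -1): A returns -524287.5, B returns 0; on ORsum([3, 5], 3): A raises IndexError, B raises IndexError
import Mathlib
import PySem

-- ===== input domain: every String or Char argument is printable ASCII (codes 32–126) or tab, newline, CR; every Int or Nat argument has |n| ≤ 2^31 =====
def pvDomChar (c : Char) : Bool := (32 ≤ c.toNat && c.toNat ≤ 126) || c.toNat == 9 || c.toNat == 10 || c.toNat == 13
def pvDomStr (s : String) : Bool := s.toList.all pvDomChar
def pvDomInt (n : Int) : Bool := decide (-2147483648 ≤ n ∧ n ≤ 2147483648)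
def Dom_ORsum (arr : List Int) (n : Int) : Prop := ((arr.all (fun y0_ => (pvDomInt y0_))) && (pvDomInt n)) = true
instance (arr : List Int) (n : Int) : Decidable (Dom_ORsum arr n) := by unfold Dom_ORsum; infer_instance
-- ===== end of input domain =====

-- B replaces the per-bit zero-counting closed form with a one-pass DP that maintains, for
-- each bit, the number of non-empty subsets of the processed prefix whose OR has that bit set.
-- ===== PORT A =====
def ORsum (arr : List Int) (n : Int) : Int :=
  -- zerocnt = [0 for i in range(INT_SIZE)]
  let zerocnt : List Int := (PySem.List.pyRange 0 20 1).map (fun _ => (0 : Int))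
  -- for i in range(INT_SIZE): for j in range(n): if not (arr[j] & (1 << i)): zerocnt[i] += 1
  let zerocnt := (PySem.List.pyRange 0 20 1).foldl (fun zc i =>
    (PySem.List.pyRange 0 n 1).foldl (fun zc j =>
      if PySem.Int.band (PySem.List.pyGetD arr j 0) (1 <<< i.toNat) = 0 then
        PySem.List.pySetD zc i (PySem.List.pyGetD zc i 0 + 1)
      else zc) zc) zerocnt
  -- ans = 0; for i in range(INT_SIZE): ans += ((2 ** n - 1) - (2 ** zerocnt[i] - 1)) * 2 ** i
  (PySem.List.pyRange 0 20 1).foldl (fun ans i =>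
    ans + (((2 : Int) ^ n.toNat - 1) - ((2 : Int) ^ (PySem.List.pyGetD zerocnt i 0).toNat - 1)) * (2 : Int) ^ i.toNat) 0

-- ===== PORT B =====
def ORsum_alt (arr : List Int) (n : Int) : Int :=
  -- cnt = [0] * INT_SIZE; pow2 = 1
  -- for j in range(n): x = arr[j]; cnt = [c + pow2 if x & (1 << i) else 2*c ...]; pow2 *= 2
  let st := (PySem.List.pyRange 0 n 1).foldl (fun (st : List Int × Int) j =>
    let x := PySem.List.pyGetD arr j 0
    ((PySem.List.enumerate st.1).map (fun p =>
        if PySem.Int.band x (1 <<< p.1.toNat) ≠ 0 then p.2 + st.2 else 2 * p.2),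
     st.2 * 2)) (List.replicate 20 (0 : Int), 1)
  -- ans = 0; for i, c in enumerate(cnt): ans += c << i
  (PySem.List.enumerate st.1).foldl (fun ans p => ans + (p.2 <<< p.1.toNat)) 0

-- ===== PRECONDITION & SPEC =====
-- A raises IndexError when n > len(arr), and for n < 0 '2 ** n' is a float, so the result
-- leaves the Int type: Pre_ excludes exactly those inputs.
def Pre_ORsum (arr : List Int) (n : Int) : Prop := 0 ≤ n ∧ n ≤ arr.length
instance (arr : List Int) (n : Int) : Decidable (Pre_ORsum arr n) := by unfold Pre_ORsum; infer_instance
def pvWitness_ORsum : List Int × Int := ([3, 5], 2)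
def Spec_ORsum (arr : List Int) (n : Int) (out : Int) : Prop := out = ORsum_alt arr n
instance (arr : List Int) (n : Int) (out : Int) : Decidable (Spec_ORsum arr n out) := by unfold Spec_ORsum; infer_instance

-- ===== CLAIM (what is proved, stated in full; the proofs are below) =====
def Claim_equal_ORsum : Prop := ∀ (arr : List Int) (n : Int), Dom_ORsum arr n → Pre_ORsum arr n → Spec_ORsum arr n (ORsum arr n)



-- ===== LEMMAS AND PROOFS =====

-- number of elements of xs whose bit i is clear
def pvZeros (i : Nat) (xs : List Int) : Nat :=
  xs.countP (fun x => decide (PySem.Int.band x (1 <<< i) = 0))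

theorem pvShiftCast (k : Nat) : (((1 <<< k : Nat) : Nat) : Int) = (1 : Int) <<< k := by
  rw [Nat.shiftLeft_eq, Int.shiftLeft_eq]; push_cast; ring

theorem pvGetSet (zc : List Int) (i v : Int) (h0 : 0 <= i) (hi : i < (zc.length : Int)) :
    PySem.List.pyGetD (PySem.List.pySetD zc i v) i 0 = v := by
  rw [PySem.List.pySetD_of_nonneg _ _ h0,
      PySem.List.pyGetD_eq_getElem _ 0 h0 (by simpa using hi)]
  rw [List.getElem_set]; exact if_pos rfl

theorem pvGetSetNe (zc : List Int) (i0 i v : Int) (hi00 : 0 <= i0) (h0 : 0 <= i)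
    (hi : i < (zc.length : Int)) (hne : i ≠ i0) :
    PySem.List.pyGetD (PySem.List.pySetD zc i0 v) i 0 = PySem.List.pyGetD zc i 0 := by
  rw [PySem.List.pySetD_of_nonneg _ _ hi00,
      PySem.List.pyGetD_eq_getElem _ 0 h0 (by simpa using hi),
      PySem.List.pyGetD_eq_getElem _ 0 h0 hi]
  rw [List.getElem_set]; exact if_neg (by omega)

theorem pvSetSet (zc : List Int) (i v w : Int) (h0 : 0 <= i) :
    PySem.List.pySetD (PySem.List.pySetD zc i v) i w = PySem.List.pySetD zc i w := by
  rw [PySem.List.pySetD_of_nonneg _ _ h0, PySem.List.pySetD_of_nonneg _ _ h0,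
      PySem.List.pySetD_of_nonneg _ _ h0, List.set_set]

-- 'for j in range(n): ... arr[j] ...' is a fold over the prefix arr.take n.toNat
theorem pvFoldTake {alpha : Type} (arr : List Int) (n : Int) (h0 : 0 <= n)
    (h1 : n <= (arr.length : Int)) (f : alpha -> Int -> alpha) (init : alpha) :
    List.foldl (fun acc j => f acc (PySem.List.pyGetD arr j 0)) init (PySem.List.pyRange 0 n 1)
      = List.foldl f init (arr.take n.toNat) := by
  have hb : ((arr.take n.toNat).length : Int) = n := by
    simp only [List.length_take]; omega
  rw [show PySem.List.pyRange 0 n 1 = PySem.List.pyRange 0 ((arr.take n.toNat).length : Int) 1 by rw [hb]]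
  rw [PySem.List.foldl_congr_mem _ _
      (fun acc j => f acc (PySem.List.pyGetD (arr.take n.toNat) j 0)) init ?_]
  · exact PySem.List.foldl_pyRange_zero_pyGetD' (arr.take n.toNat) 0 f init
  · intro acc j hj
    rw [PySem.List.mem_pyRange_one] at hj
    have hjl : j < ((arr.take n.toNat).length : Int) := hj.2
    have hj2 : j < (arr.length : Int) := by
      simp only [List.length_take] at hjl; push_cast at hjl ⊢; omega
    show f acc (PySem.List.pyGetD arr j 0) = f acc (PySem.List.pyGetD (List.take n.toNat arr) j 0)
    rw [PySem.List.pyGetD_eq_getElem _ 0 hj.1 hj2,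
        PySem.List.pyGetD_eq_getElem _ 0 hj.1 hjl, List.getElem_take]

theorem pvFoldTakeA (arr : List Int) (n : Int) (h0 : 0 <= n) (h1 : n <= (arr.length : Int))
    (i : Int) (zc : List Int) :
    List.foldl (fun zc j => if PySem.Int.band (PySem.List.pyGetD arr j 0) (1 <<< i.toNat) = 0 then
        PySem.List.pySetD zc i (PySem.List.pyGetD zc i 0 + 1) else zc) zc (PySem.List.pyRange 0 n 1)
      = List.foldl (fun zc x => if PySem.Int.band x (1 <<< i.toNat) = 0 then
        PySem.List.pySetD zc i (PySem.List.pyGetD zc i 0 + 1) else zc) zc (arr.take n.toNat) :=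
  pvFoldTake arr n h0 h1 (fun zc x => if PySem.Int.band x (1 <<< i.toNat) = 0 then
        PySem.List.pySetD zc i (PySem.List.pyGetD zc i 0 + 1) else zc) zc

theorem pvFoldTakeB (arr : List Int) (n : Int) (h0 : 0 <= n) (h1 : n <= (arr.length : Int)) :
    List.foldl (fun (st : List Int × Int) j =>
        ((PySem.List.enumerate st.1).map (fun p =>
          if PySem.Int.band (PySem.List.pyGetD arr j 0) (1 <<< p.1.toNat) ≠ 0 then p.2 + st.2 else 2 * p.2),
         st.2 * 2)) (List.replicate 20 (0 : Int), 1) (PySem.List.pyRange 0 n 1)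
      = List.foldl (fun (st : List Int × Int) x =>
        ((PySem.List.enumerate st.1).map (fun p =>
          if PySem.Int.band x (1 <<< p.1.toNat) ≠ 0 then p.2 + st.2 else 2 * p.2),
         st.2 * 2)) (List.replicate 20 (0 : Int), 1) (arr.take n.toNat) :=
  pvFoldTake arr n h0 h1 (fun (st : List Int × Int) x =>
        ((PySem.List.enumerate st.1).map (fun p =>
          if PySem.Int.band x (1 <<< p.1.toNat) ≠ 0 then p.2 + st.2 else 2 * p.2),
         st.2 * 2)) (List.replicate 20 (0 : Int), 1)

-- A's inner loop over the prefix only bumps slot i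
theorem pvInnerA (i : Int) (h0 : 0 <= i) (xs : List Int) : ∀ (zc : List Int), i < (zc.length : Int) ->
    List.foldl (fun zc x => if PySem.Int.band x (1 <<< i.toNat) = 0 then
        PySem.List.pySetD zc i (PySem.List.pyGetD zc i 0 + 1) else zc) zc xs
      = PySem.List.pySetD zc i (PySem.List.pyGetD zc i 0 + (pvZeros i.toNat xs : Int)) := by
  induction xs with
  | nil =>
    intro zc hi
    simp only [List.foldl_nil, pvZeros, List.countP_nil, Nat.cast_zero, add_zero]
    rw [PySem.List.pySetD_of_nonneg _ _ h0, PySem.List.pyGetD_eq_getElem _ 0 h0 hi,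
        List.set_getElem_self]
  | cons x xs ih =>
    intro zc hi
    by_cases hp : PySem.Int.band x (1 <<< i.toNat) = 0
    · simp only [List.foldl_cons, if_pos hp]
      rw [ih _ (by rw [PySem.List.length_pySetD]; exact hi),
          pvGetSet zc i _ h0 hi, pvSetSet zc i _ _ h0]
      congr 1
      simp only [pvZeros, List.countP_cons, hp, decide_true, if_pos]
      push_cast; ring
    · simp only [List.foldl_cons, if_neg hp]
      rw [ih _ hi]
      congr 2
      simp only [pvZeros, List.countP_cons, hp, decide_false]
      push_cast; ring

-- the outer loop fills each slot i ∈ L with its zero count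
theorem pvOuterA (xs : List Int) (L : List Int) : ∀ (zc : List Int),
    (∀ i ∈ L, 0 <= i ∧ i < (zc.length : Int)) -> L.Nodup ->
    ∀ i : Int, 0 <= i -> i < (zc.length : Int) ->
      PySem.List.pyGetD (List.foldl (fun zc i =>
          List.foldl (fun zc x => if PySem.Int.band x (1 <<< i.toNat) = 0 then
            PySem.List.pySetD zc i (PySem.List.pyGetD zc i 0 + 1) else zc) zc xs) zc L) i 0
        = PySem.List.pyGetD zc i 0 + (if i ∈ L then (pvZeros i.toNat xs : Int) else 0) := by
  induction L with
  | nil => intro zc _ _ i h0 h1; simp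
  | cons i0 L ih =>
    intro zc hL hnd i h0 h1
    have hi0 := hL i0 List.mem_cons_self
    rw [List.foldl_cons, pvInnerA i0 hi0.1 xs zc hi0.2]
    have hlen : (PySem.List.pySetD zc i0 (PySem.List.pyGetD zc i0 0 + (pvZeros i0.toNat xs : Int))).length = zc.length :=
      PySem.List.length_pySetD _ _ _
    rw [ih _ (fun j hj => by rw [hlen]; exact hL j (List.mem_cons_of_mem _ hj))
        (List.nodup_cons.mp hnd).2 i h0 (by rw [hlen]; exact h1)]
    by_cases hii : i = i0
    · subst hii
      have hnm : i ∉ L := (List.nodup_cons.mp hnd).1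
      rw [if_neg hnm, add_zero, if_pos List.mem_cons_self, pvGetSet zc i _ h0 h1]
    · have hite : (if i ∈ i0 :: L then (pvZeros i.toNat xs : Int) else 0)
          = (if i ∈ L then (pvZeros i.toNat xs : Int) else 0) := by simp [hii]
      rw [hite.symm] at *
      rw [pvGetSetNe zc i0 i _ hi0.1 h0 h1 hii, hite]

-- list(enumerate(l1 + l2, s))
theorem pvEnumAppend {alpha : Type} (l1 l2 : List alpha) : ∀ s : Int,
    PySem.List.enumerate (l1 ++ l2) s
      = PySem.List.enumerate l1 s ++ PySem.List.enumerate l2 (s + l1.length) := by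
  induction l1 with
  | nil => intro s; simp [PySem.List.enumerate_nil]
  | cons a l1 ih =>
    intro s
    rw [List.cons_append, PySem.List.enumerate_cons, PySem.List.enumerate_cons, ih (s + 1),
        List.cons_append, List.length_cons,
        show s + ((l1.length + 1 : Nat) : Int) = s + 1 + (l1.length : Int) by push_cast; ring]

-- list(enumerate((range m).map g, s))
theorem pvEnumMapRange {alpha : Type} (m : Nat) (g : Nat -> alpha) (s : Int) :
    PySem.List.enumerate ((List.range m).map g) s
      = (List.range m).map (fun (k : Nat) => (s + (k : Int), g k)) := by
  induction m with
  | zero => simp [PySem.List.enumerate_nil]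
  | succ m ih =>
    rw [List.range_succ, List.map_append, List.map_append, pvEnumAppend, ih]
    congr 1
    rw [List.map_singleton, List.map_singleton, PySem.List.enumerate_cons,
        PySem.List.enumerate_nil]
    simp

-- B's loop invariant: cnt[i] = 2^k - 2^(zeros_i), pow2 = 2^k
theorem pvBInv (xs : List Int) :
    List.foldl (fun (st : List Int × Int) x =>
        ((PySem.List.enumerate st.1).map (fun p =>
          if PySem.Int.band x (1 <<< p.1.toNat) ≠ 0 then p.2 + st.2 else 2 * p.2),
         st.2 * 2)) (List.replicate 20 (0 : Int), 1) xs
      = ((List.range 20).map (fun k => (2 : Int) ^ xs.length - 2 ^ (pvZeros k xs)),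
         2 ^ xs.length) := by
  induction xs using List.reverseRecOn with
  | nil => decide
  | append_singleton xs x ih =>
    rw [List.foldl_append, List.foldl_cons, List.foldl_nil, ih]
    dsimp only
    rw [pvEnumMapRange 20 _ 0, List.map_map, List.length_append]
    rw [Prod.mk.injEq]
    refine ⟨?_, by rw [List.length_singleton, pow_succ]⟩
    refine List.map_congr_left ?_
    intro k _
    simp only [Function.comp]
    have ht : ((0 : Int) + (k : Int)).toNat = k := by omega
    rw [ht, show xs.length + [x].length = xs.length + 1 from by simp]
    simp only [pvShiftCast]
    by_cases hp : PySem.Int.band x ((1 : Int) <<< k) = 0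
    · have hz : pvZeros k (xs ++ [x]) = pvZeros k xs + 1 := by
        simp [pvZeros, List.countP_append, hp]
      rw [if_neg (by simp [hp]), hz, pow_succ, pow_succ]; ring
    · have hz : pvZeros k (xs ++ [x]) = pvZeros k xs := by
        simp [pvZeros, List.countP_append, hp]
      rw [if_pos hp, hz, pow_succ]; ring

-- ===== VERDICT (by name: the statement is the Claim_ definition above) =====
theorem ORsum_spec : Claim_equal_ORsum := by
  intro arr n _ hpre
  obtain ⟨h0, h1⟩ := hpre
  unfold Spec_ORsum ORsum ORsum_alt
  dsimp only
  rw [pvFoldTakeB arr n h0 h1, pvBInv (List.take n.toNat arr)]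
  dsimp only
  rw [pvEnumMapRange 20 _ 0, List.foldl_map, PySem.List.foldl_add]
  rw [PySem.List.foldl_congr_mem (PySem.List.pyRange 0 20 1) _ _ _
      (fun acc i _ => pvFoldTakeA arr n h0 h1 i acc)]
  rw [PySem.List.foldl_add]
  rw [show (20 : Int) = ((20 : Nat) : Int) from rfl]
  rw [PySem.List.pyRange_zero_nat 20, List.map_map, List.map_map]
  refine congrArg₂ _ rfl (congrArg _ (List.map_congr_left ?_))
  intro k hk
  have hk20 : k < 20 := List.mem_range.mp hk
  simp only [Function.comp]
  have hpr : List.map (fun k : Nat => (k : Int)) (List.range 20) = PySem.List.pyRange 0 ((20 : Nat) : Int) 1 :=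
    (PySem.List.pyRange_zero_nat 20).symm
  have hzc0 : List.map ((fun _ : Int => (0 : Int)) ∘ fun k : Nat => (k : Int)) (List.range 20)
      = List.map (fun _ : Int => (0 : Int)) (PySem.List.pyRange 0 ((20 : Nat) : Int) 1) := by
    rw [← List.map_map, hpr]
  rw [hzc0, hpr]
  have hlen0 : ((((PySem.List.pyRange 0 ((20 : Nat) : Int) 1).map (fun _ : Int => (0 : Int))).length : Int)) = 20 := by
    simp [PySem.List.length_pyRange_one]
  rw [pvOuterA (List.take n.toNat arr) (PySem.List.pyRange 0 ((20 : Nat) : Int) 1) _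
      (fun i hi => by
        rw [PySem.List.mem_pyRange_one] at hi
        exact ⟨hi.1, by rw [hlen0]; exact_mod_cast hi.2⟩)
      (PySem.List.nodup_pyRange_one 0 ((20 : Nat) : Int)) (k : Int) (by positivity)
      (by rw [hlen0]; exact_mod_cast hk20)]
  rw [if_pos (PySem.List.mem_pyRange_one.mpr ⟨by positivity, by exact_mod_cast hk20⟩)]
  rw [PySem.List.pyGetD_map_pyRange (fun _ : Int => (0 : Int)) 20 k 0 hk20]
  have hxslen : (List.take n.toNat arr).length = n.toNat := by
    rw [List.length_take]; omega
  simp only [zero_add, Int.toNat_natCast, hxslen, Int.shiftLeft_eq]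
  ring
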